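-- pv_equiv track=rewrite | github.com/dp-web4/ARC-SAGE | knowledge/game-solvers/tu93_solver.py | build_maze_graph
-- ===== SOURCE A (Python) =====
-- from typing import List, Tuple, Optional, Dict, Set
--
-- GRID_UNIT = 3  # bsfndluqyd
--
-- GRID_NODE = 6  # twsfmzbqkg
--
-- def build_maze_graph(walkable: Set[Tuple[int, int]], maze_x: int, maze_y: int,
--                      gw: int, gh: int) -> Dict[Tuple[int, int], Set[Tuple[int, int]]]:
--     """Build navigation graph for the maze.
--
--     The player moves by one input step (GRID_UNIT=3px), then slides to the next
--     grid node (multiples of GRID_NODE=6). One input = move to adjacent grid node.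
--
--     Grid nodes are at maze-local positions where both x and y are multiples of
--     GRID_NODE (6). Two nodes are connected if there's a walkable path block
--     between them (at the midpoint).
--
--     Returns graph in WORLD coordinates.
--     """
--     # Find grid node positions (multiples of GRID_NODE in local coords)
--     arr_h = max(wy for _, wy in walkable) + GRID_UNIT if walkable else 0
--     arr_w = max(wx for wx, _ in walkable) + GRID_UNIT if walkable else 0
--
--     nodes = set()
--     for wy in range(0, arr_h + 1, GRID_NODE):
--         for wx in range(0, arr_w + 1, GRID_NODE):
--             nodes.add((wx, wy))
--
--     graph = {}
--     for nx, ny in nodes: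
--         world_x = nx + maze_x
--         world_y = ny + maze_y
--         neighbors = set()
--
--         # Check 4 directions to adjacent grid nodes (GRID_NODE=6 apart)
--         # The midpoint (at GRID_UNIT=3) must be walkable
--         for dx, dy in [(GRID_NODE, 0), (-GRID_NODE, 0), (0, GRID_NODE), (0, -GRID_NODE)]:
--             mid_x = nx + dx // 2
--             mid_y = ny + dy // 2
--             dest_x = nx + dx
--             dest_y = ny + dy
--
--             # Check if the midpoint is walkable (the path between nodes)
--             if (mid_x, mid_y) in walkable:
--                 neighbor = (dest_x + maze_x, dest_y + maze_y)
--                 neighbors.add(neighbor)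
--
--         graph[(world_x, world_y)] = neighbors
--
--     return graph
-- ===== SOURCE B (Python) =====
-- GRID_UNIT = 3
--
-- GRID_NODE = 6
--
-- # door bits and the 16-entry decode table: entry m lists, in canonical order,
-- # the node offsets whose bit is set in m
-- _BITS = ((1, (6, 0)), (2, (-6, 0)), (4, (0, 6)), (8, (0, -6)))
-- _TABLE = [[off for bit, off in _BITS if m & bit] for m in range(16)]
--
-- def build_maze_graph(walkable, maze_x, maze_y, gw, gh):
--     """Build the navigation graph edge-first: one pass over walkable turns each
--     true midpoint cell into door bits on its two endpoint nodes; the node loop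
--     then just decodes each node's 4-bit mask through a 16-entry offset table."""
--     arr_h = max(wy for _, wy in walkable) + GRID_UNIT if walkable else 0
--     arr_w = max(wx for wx, _ in walkable) + GRID_UNIT if walkable else 0
--
--     mask = {}
--     for mx, my in walkable:
--         if mx % GRID_NODE == GRID_UNIT and my % GRID_NODE == 0:
--             # horizontal door: +x bit on the left node, -x bit on the right node
--             mask[(mx - GRID_UNIT, my)] = mask.get((mx - GRID_UNIT, my), 0) | 1
--             mask[(mx + GRID_UNIT, my)] = mask.get((mx + GRID_UNIT, my), 0) | 2
--         elif mx % GRID_NODE == 0 and my % GRID_NODE == GRID_UNIT: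
--             # vertical door: +y bit on the node above, -y bit on the node below
--             mask[(mx, my - GRID_UNIT)] = mask.get((mx, my - GRID_UNIT), 0) | 4
--             mask[(mx, my + GRID_UNIT)] = mask.get((mx, my + GRID_UNIT), 0) | 8
--
--     nodes = set()
--     for wy in range(0, arr_h + 1, GRID_NODE):
--         for wx in range(0, arr_w + 1, GRID_NODE):
--             nodes.add((wx, wy))
--
--     graph = {}
--     for nx, ny in nodes:
--         graph[(nx + maze_x, ny + maze_y)] = {
--             (nx + dx + maze_x, ny + dy + maze_y)
--             for dx, dy in _TABLE[mask.get((nx, ny), 0)]}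
--     return graph
-- ===== Notes on version B (the rewrite author's own statement) =====
-- stated objective: alternative
-- what changed: B is edge-first and table-driven: one pass over walkable converts each true midpoint cell into door bits on its two endpoint nodes (a node->4-bit-mask dict), and the node loop then builds each neighbour set with a single mask lookup decoded through a precomputed 16-entry offset table, replacing A's four membership probes and branch chain per node.
import Mathlib
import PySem

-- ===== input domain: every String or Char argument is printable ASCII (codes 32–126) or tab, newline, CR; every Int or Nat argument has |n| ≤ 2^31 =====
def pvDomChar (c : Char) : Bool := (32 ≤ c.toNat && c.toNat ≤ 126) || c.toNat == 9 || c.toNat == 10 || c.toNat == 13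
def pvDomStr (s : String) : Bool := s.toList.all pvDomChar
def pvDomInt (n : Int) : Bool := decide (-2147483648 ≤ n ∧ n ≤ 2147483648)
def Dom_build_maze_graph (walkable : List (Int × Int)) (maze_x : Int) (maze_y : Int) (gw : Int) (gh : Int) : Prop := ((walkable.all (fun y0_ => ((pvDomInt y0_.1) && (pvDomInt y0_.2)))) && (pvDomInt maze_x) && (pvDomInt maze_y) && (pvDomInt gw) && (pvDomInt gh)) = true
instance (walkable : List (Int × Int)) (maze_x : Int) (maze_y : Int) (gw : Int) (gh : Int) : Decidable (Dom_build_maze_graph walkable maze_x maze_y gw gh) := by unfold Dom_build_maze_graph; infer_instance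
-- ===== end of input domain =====

-- B is edge-first and table-driven: one pass over walkable turns each true midpoint cell
-- into door bits on its two endpoint nodes, and the node loop decodes each node's 4-bit
-- mask through a precomputed 16-entry offset table (objective: alternative).
-- Python-set/dict iteration orders in the result are compared ignoring order.

-- ===== PORT A =====
-- `max(...) + 3 if walkable else 0`: max? is none exactly when walkable is empty,
-- so the match is the guarded max.
def build_maze_graph (walkable : List (Int × Int)) (maze_x : Int) (maze_y : Int) (gw : Int) (gh : Int) : List (Int × Int × List (Int × Int)) :=
  let arr_h : Int := match PySem.List.max? (walkable.map (fun w => w.2)) (fun v => v) with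
    | some m => m + 3
    | none => 0
  let arr_w : Int := match PySem.List.max? (walkable.map (fun w => w.1)) (fun v => v) with
    | some m => m + 3
    | none => 0
  let nodes : PySem.Set (Int × Int) :=
    (PySem.List.pyRange 0 (arr_h + 1) 6).foldl (fun ns wy =>
      (PySem.List.pyRange 0 (arr_w + 1) 6).foldl (fun ns wx => ns.add (wx, wy)) ns)
      PySem.Set.empty
  let graph : PySem.Dict (Int × Int) (List (Int × Int)) :=
    nodes.foldl (fun g nd =>
      let neighbors : PySem.Set (Int × Int) :=
        [((6 : Int), (0 : Int)), (-6, 0), (0, 6), (0, -6)].foldl (fun s d =>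
          if walkable.contains (nd.1 + PySem.Int.floordiv d.1 2, nd.2 + PySem.Int.floordiv d.2 2) then
            s.add (nd.1 + d.1 + maze_x, nd.2 + d.2 + maze_y)
          else s) PySem.Set.empty
      g.insert (nd.1 + maze_x, nd.2 + maze_y) neighbors)
      PySem.Dict.empty
  graph.items.map (fun kv => (kv.1.1, kv.1.2, kv.2))

-- ===== PORT B =====
-- _TABLE = [[off for bit, off in _BITS if m & bit] for m in range(16)]
def bmgTable : List (List (Int × Int)) :=
  (PySem.List.pyRange 0 16 1).map (fun m =>
    [((1 : Int), ((6 : Int), (0 : Int))), (2, (-6, 0)), (4, (0, 6)), (8, (0, -6))].filterMap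
      (fun bo => if PySem.Int.band m bo.1 ≠ 0 then some bo.2 else none))

-- the one pass over walkable: each true midpoint cell sets door bits on its two endpoint nodes
def bmgMasks (walkable : List (Int × Int)) : PySem.Dict (Int × Int) Int :=
  walkable.foldl (fun d c =>
    if PySem.Int.mod c.1 6 == 3 && PySem.Int.mod c.2 6 == 0 then
      let d1 := d.insert (c.1 - 3, c.2) (PySem.Int.bor (d.getD (c.1 - 3, c.2) 0) 1)
      d1.insert (c.1 + 3, c.2) (PySem.Int.bor (d1.getD (c.1 + 3, c.2) 0) 2)
    else if PySem.Int.mod c.1 6 == 0 && PySem.Int.mod c.2 6 == 3 then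
      let d1 := d.insert (c.1, c.2 - 3) (PySem.Int.bor (d.getD (c.1, c.2 - 3) 0) 4)
      d1.insert (c.1, c.2 + 3) (PySem.Int.bor (d1.getD (c.1, c.2 + 3) 0) 8)
    else d) PySem.Dict.empty

def build_maze_graph_alt (walkable : List (Int × Int)) (maze_x : Int) (maze_y : Int) (gw : Int) (gh : Int) : List (Int × Int × List (Int × Int)) :=
  let arr_h : Int := match PySem.List.max? (walkable.map (fun w => w.2)) (fun v => v) with
    | some m => m + 3
    | none => 0
  let arr_w : Int := match PySem.List.max? (walkable.map (fun w => w.1)) (fun v => v) with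
    | some m => m + 3
    | none => 0
  let mask := bmgMasks walkable
  let nodes : PySem.Set (Int × Int) :=
    (PySem.List.pyRange 0 (arr_h + 1) 6).foldl (fun ns wy =>
      (PySem.List.pyRange 0 (arr_w + 1) 6).foldl (fun ns wx => ns.add (wx, wy)) ns)
      PySem.Set.empty
  let graph : PySem.Dict (Int × Int) (List (Int × Int)) :=
    nodes.foldl (fun g nd =>
      g.insert (nd.1 + maze_x, nd.2 + maze_y)
        ((PySem.List.pyGetD bmgTable (mask.getD (nd.1, nd.2) 0) []).foldl
          (fun s off => PySem.Set.add s (nd.1 + off.1 + maze_x, nd.2 + off.2 + maze_y))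
          PySem.Set.empty))
      PySem.Dict.empty
  graph.items.map (fun kv => (kv.1.1, kv.1.2, kv.2))

-- ===== PRECONDITION & SPEC =====
def Spec_build_maze_graph (walkable : List (Int × Int)) (maze_x : Int) (maze_y : Int) (gw : Int) (gh : Int) (out : List (Int × Int × List (Int × Int))) : Prop := out = build_maze_graph_alt walkable maze_x maze_y gw gh
instance (walkable : List (Int × Int)) (maze_x : Int) (maze_y : Int) (gw : Int) (gh : Int) (out : List (Int × Int × List (Int × Int))) : Decidable (Spec_build_maze_graph walkable maze_x maze_y gw gh out) := by unfold Spec_build_maze_graph; infer_instance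

-- ===== CLAIM (what is proved, stated in full; the proofs are below) =====
def Claim_equal_build_maze_graph : Prop := ∀ (walkable : List (Int × Int)) (maze_x : Int) (maze_y : Int) (gw : Int) (gh : Int), Dom_build_maze_graph walkable maze_x maze_y gw gh → Spec_build_maze_graph walkable maze_x maze_y gw gh (build_maze_graph walkable maze_x maze_y gw gh)

-- ===== LEMMAS AND PROOFS =====

-- The row-major list of grid nodes both programs enumerate.
def bmgNodeList (arr_h arr_w : Int) : List (Int × Int) :=
  (PySem.List.pyRange 0 (arr_h + 1) 6).flatMap (fun wy =>
    (PySem.List.pyRange 0 (arr_w + 1) 6).map (fun wx => (wx, wy)))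

-- A's neighbour computation for one node, and B's (zeta-expansions of the port bodies).
def bmgNeighA (walkable : List (Int × Int)) (maze_x maze_y nx ny : Int) : List (Int × Int) :=
  [((6 : Int), (0 : Int)), (-6, 0), (0, 6), (0, -6)].foldl (fun s d =>
    if walkable.contains (nx + PySem.Int.floordiv d.1 2, ny + PySem.Int.floordiv d.2 2) then
      PySem.Set.add s (nx + d.1 + maze_x, ny + d.2 + maze_y)
    else s) PySem.Set.empty

def bmgNeighB (walkable : List (Int × Int)) (maze_x maze_y nx ny : Int) : List (Int × Int) :=
  (PySem.List.pyGetD bmgTable ((bmgMasks walkable).getD (nx, ny) 0) []).foldl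
    (fun s off => PySem.Set.add s (nx + off.1 + maze_x, ny + off.2 + maze_y))
    PySem.Set.empty

-- named form of B's mask-building step (definitionally the port's fold body)
def bmgMaskStep (d : PySem.Dict (Int × Int) Int) (c : Int × Int) : PySem.Dict (Int × Int) Int :=
  if PySem.Int.mod c.1 6 == 3 && PySem.Int.mod c.2 6 == 0 then
    (d.insert (c.1 - 3, c.2) (PySem.Int.bor (d.getD (c.1 - 3, c.2) 0) 1)).insert (c.1 + 3, c.2)
      (PySem.Int.bor ((d.insert (c.1 - 3, c.2) (PySem.Int.bor (d.getD (c.1 - 3, c.2) 0) 1)).getD (c.1 + 3, c.2) 0) 2)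
  else if PySem.Int.mod c.1 6 == 0 && PySem.Int.mod c.2 6 == 3 then
    (d.insert (c.1, c.2 - 3) (PySem.Int.bor (d.getD (c.1, c.2 - 3) 0) 4)).insert (c.1, c.2 + 3)
      (PySem.Int.bor ((d.insert (c.1, c.2 - 3) (PySem.Int.bor (d.getD (c.1, c.2 - 3) 0) 4)).getD (c.1, c.2 + 3) 0) 8)
  else d

lemma bmgMasks_eq_foldl (w : List (Int × Int)) : bmgMasks w = w.foldl bmgMaskStep PySem.Dict.empty := rfl

-- which processed midpoint cells give point p a given door bit
def bmgHitR (w : List (Int × Int)) (p : Int × Int) : Bool :=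
  w.any (fun c => PySem.Int.mod c.1 6 == 3 && PySem.Int.mod c.2 6 == 0 && decide (p = (c.1 - 3, c.2)))
def bmgHitL (w : List (Int × Int)) (p : Int × Int) : Bool :=
  w.any (fun c => PySem.Int.mod c.1 6 == 3 && PySem.Int.mod c.2 6 == 0 && decide (p = (c.1 + 3, c.2)))
def bmgHitD (w : List (Int × Int)) (p : Int × Int) : Bool :=
  w.any (fun c => PySem.Int.mod c.1 6 == 0 && PySem.Int.mod c.2 6 == 3 && decide (p = (c.1, c.2 - 3)))
def bmgHitU (w : List (Int × Int)) (p : Int × Int) : Bool :=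
  w.any (fun c => PySem.Int.mod c.1 6 == 0 && PySem.Int.mod c.2 6 == 3 && decide (p = (c.1, c.2 + 3)))

def bmgMaskVal (r l d u : Bool) : Int :=
  (if r then 1 else 0) + (if l then 2 else 0) + (if d then 4 else 0) + (if u then 8 else 0)

lemma bmg_bor1 (r l d u : Bool) : PySem.Int.bor (bmgMaskVal r l d u) 1 = bmgMaskVal true l d u := by
  cases r <;> cases l <;> cases d <;> cases u <;> decide
lemma bmg_bor2 (r l d u : Bool) : PySem.Int.bor (bmgMaskVal r l d u) 2 = bmgMaskVal r true d u := by
  cases r <;> cases l <;> cases d <;> cases u <;> decide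
lemma bmg_bor4 (r l d u : Bool) : PySem.Int.bor (bmgMaskVal r l d u) 4 = bmgMaskVal r l true u := by
  cases r <;> cases l <;> cases d <;> cases u <;> decide
lemma bmg_bor8 (r l d u : Bool) : PySem.Int.bor (bmgMaskVal r l d u) 8 = bmgMaskVal r l d true := by
  cases r <;> cases l <;> cases d <;> cases u <;> decide

lemma bmgMaskStep_pos1 (d : PySem.Dict (Int × Int) Int) (c : Int × Int)
    (h : PySem.Int.mod c.1 6 = 3 ∧ PySem.Int.mod c.2 6 = 0) :
    bmgMaskStep d c =
      (d.insert (c.1 - 3, c.2) (PySem.Int.bor (d.getD (c.1 - 3, c.2) 0) 1)).insert (c.1 + 3, c.2)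
        (PySem.Int.bor ((d.insert (c.1 - 3, c.2) (PySem.Int.bor (d.getD (c.1 - 3, c.2) 0) 1)).getD (c.1 + 3, c.2) 0) 2) := by
  unfold bmgMaskStep
  rw [if_pos (by rw [Bool.and_eq_true, beq_iff_eq, beq_iff_eq]; exact h)]

lemma bmgMaskStep_pos2 (d : PySem.Dict (Int × Int) Int) (c : Int × Int)
    (h : PySem.Int.mod c.1 6 = 0 ∧ PySem.Int.mod c.2 6 = 3) :
    bmgMaskStep d c =
      (d.insert (c.1, c.2 - 3) (PySem.Int.bor (d.getD (c.1, c.2 - 3) 0) 4)).insert (c.1, c.2 + 3)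
        (PySem.Int.bor ((d.insert (c.1, c.2 - 3) (PySem.Int.bor (d.getD (c.1, c.2 - 3) 0) 4)).getD (c.1, c.2 + 3) 0) 8) := by
  unfold bmgMaskStep
  rw [if_neg (by rw [Bool.and_eq_true, beq_iff_eq, beq_iff_eq]; rintro ⟨h0, -⟩; rw [h.1] at h0; norm_num at h0),
    if_pos (by rw [Bool.and_eq_true, beq_iff_eq, beq_iff_eq]; exact h)]

lemma bmgMaskStep_neg (d : PySem.Dict (Int × Int) Int) (c : Int × Int)
    (h1 : ¬ (PySem.Int.mod c.1 6 = 3 ∧ PySem.Int.mod c.2 6 = 0))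
    (h2 : ¬ (PySem.Int.mod c.1 6 = 0 ∧ PySem.Int.mod c.2 6 = 3)) :
    bmgMaskStep d c = d := by
  unfold bmgMaskStep
  rw [if_neg (by rw [Bool.and_eq_true, beq_iff_eq, beq_iff_eq]; exact h1),
    if_neg (by rw [Bool.and_eq_true, beq_iff_eq, beq_iff_eq]; exact h2)]

-- the fold invariant: getD of the mask dict is the maskVal of the accumulated hit booleans
lemma bmg_mask_inv (w : List (Int × Int)) (d : PySem.Dict (Int × Int) Int)
    (f1 f2 f3 f4 : Int × Int → Bool)
    (hd : ∀ p, d.getD p 0 = bmgMaskVal (f1 p) (f2 p) (f3 p) (f4 p)) (p : Int × Int) :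
    (w.foldl bmgMaskStep d).getD p 0 =
      bmgMaskVal (f1 p || bmgHitR w p) (f2 p || bmgHitL w p) (f3 p || bmgHitD w p) (f4 p || bmgHitU w p) := by
  induction w generalizing d f1 f2 f3 f4 with
  | nil => simp [bmgHitR, bmgHitL, bmgHitD, bmgHitU, hd]
  | cons c cs ih =>
    rw [List.foldl_cons]
    by_cases h1 : PySem.Int.mod c.1 6 = 3 ∧ PySem.Int.mod c.2 6 = 0
    · rw [bmgMaskStep_pos1 d c h1]
      have hLR : ((c.1 - 3 : Int), c.2) ≠ ((c.1 + 3 : Int), c.2) := by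
        intro h; injection h with h _; omega
      have hd' : ∀ q, ((d.insert (c.1 - 3, c.2) (PySem.Int.bor (d.getD (c.1 - 3, c.2) 0) 1)).insert (c.1 + 3, c.2)
          (PySem.Int.bor ((d.insert (c.1 - 3, c.2) (PySem.Int.bor (d.getD (c.1 - 3, c.2) 0) 1)).getD (c.1 + 3, c.2) 0) 2)).getD q 0 =
          bmgMaskVal (f1 q || decide (q = (c.1 - 3, c.2))) (f2 q || decide (q = (c.1 + 3, c.2))) (f3 q) (f4 q) := by
        intro q
        rw [PySem.Dict.getD_insert, PySem.Dict.getD_insert, PySem.Dict.getD_insert]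
        have hne : ((c.1 + 3 : Int), c.2) ≠ ((c.1 - 3 : Int), c.2) := Ne.symm hLR
        have hne' : (c.1 - 3 : Int) ≠ c.1 + 3 := by omega
        by_cases hq2 : q = ((c.1 + 3 : Int), c.2)
        · rw [if_pos hq2, if_neg hne, hd, bmg_bor2]
          simp [hq2, hne]
        · by_cases hq1 : q = ((c.1 - 3 : Int), c.2)
          · rw [if_neg hq2, if_pos hq1, hd, bmg_bor1]
            simp [hq1, hne']
          · rw [if_neg hq2, if_neg hq1, hd]
            simp [hq1, hq2]
      rw [ih _ _ _ _ _ hd']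
      have hm1 : c.1 % 6 = 3 := by
        rw [← PySem.Int.mod_eq_emod_of_pos (b := 6) (by norm_num)]; exact h1.1
      have hm2 : c.2 % 6 = 0 := by
        rw [← PySem.Int.mod_eq_emod_of_pos (b := 6) (by norm_num)]; exact h1.2
      have e1 : bmgHitR (c :: cs) p = (decide (p = (c.1 - 3, c.2)) || bmgHitR cs p) := by
        simp [bmgHitR, List.any_cons, hm1, hm2]
      have e2 : bmgHitL (c :: cs) p = (decide (p = (c.1 + 3, c.2)) || bmgHitL cs p) := by
        simp [bmgHitL, List.any_cons, hm1, hm2]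
      have e3 : bmgHitD (c :: cs) p = bmgHitD cs p := by
        simp [bmgHitD, List.any_cons, hm1]
      have e4 : bmgHitU (c :: cs) p = bmgHitU cs p := by
        simp [bmgHitU, List.any_cons, hm1]
      rw [e1, e2, e3, e4, Bool.or_assoc, Bool.or_assoc]
    · by_cases h2 : PySem.Int.mod c.1 6 = 0 ∧ PySem.Int.mod c.2 6 = 3
      · rw [bmgMaskStep_pos2 d c h2]
        have hLR : ((c.1 : Int), c.2 - 3) ≠ ((c.1 : Int), c.2 + 3) := by
          intro h; injection h with _ h; omega
        have hd' : ∀ q, ((d.insert (c.1, c.2 - 3) (PySem.Int.bor (d.getD (c.1, c.2 - 3) 0) 4)).insert (c.1, c.2 + 3)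
            (PySem.Int.bor ((d.insert (c.1, c.2 - 3) (PySem.Int.bor (d.getD (c.1, c.2 - 3) 0) 4)).getD (c.1, c.2 + 3) 0) 8)).getD q 0 =
            bmgMaskVal (f1 q) (f2 q) (f3 q || decide (q = (c.1, c.2 - 3))) (f4 q || decide (q = (c.1, c.2 + 3))) := by
          intro q
          rw [PySem.Dict.getD_insert, PySem.Dict.getD_insert, PySem.Dict.getD_insert]
          have hne : ((c.1 : Int), c.2 + 3) ≠ ((c.1 : Int), c.2 - 3) := Ne.symm hLR
          have hne' : (c.2 - 3 : Int) ≠ c.2 + 3 := by omega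
          by_cases hq2 : q = ((c.1 : Int), c.2 + 3)
          · rw [if_pos hq2, if_neg hne, hd, bmg_bor8]
            simp [hq2, hne]
          · by_cases hq1 : q = ((c.1 : Int), c.2 - 3)
            · rw [if_neg hq2, if_pos hq1, hd, bmg_bor4]
              simp [hq1, hne']
            · rw [if_neg hq2, if_neg hq1, hd]
              simp [hq1, hq2]
        rw [ih _ _ _ _ _ hd']
        have hm1 : c.1 % 6 = 0 := by
          rw [← PySem.Int.mod_eq_emod_of_pos (b := 6) (by norm_num)]; exact h2.1
        have hm2 : c.2 % 6 = 3 := by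
          rw [← PySem.Int.mod_eq_emod_of_pos (b := 6) (by norm_num)]; exact h2.2
        have e1 : bmgHitR (c :: cs) p = bmgHitR cs p := by
          simp [bmgHitR, List.any_cons, hm1]
        have e2 : bmgHitL (c :: cs) p = bmgHitL cs p := by
          simp [bmgHitL, List.any_cons, hm1]
        have e3 : bmgHitD (c :: cs) p = (decide (p = (c.1, c.2 - 3)) || bmgHitD cs p) := by
          simp [bmgHitD, List.any_cons, hm1, hm2]
        have e4 : bmgHitU (c :: cs) p = (decide (p = (c.1, c.2 + 3)) || bmgHitU cs p) := by
          simp [bmgHitU, List.any_cons, hm1, hm2]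
        rw [e1, e2, e3, e4, Bool.or_assoc, Bool.or_assoc]
      · rw [bmgMaskStep_neg d c h1 h2, ih _ _ _ _ _ hd]
        have e1 : bmgHitR (c :: cs) p = bmgHitR cs p := by
          simp only [bmgHitR, List.any_cons, Bool.or_eq_right_iff_imp, Bool.and_eq_true,
            beq_iff_eq, decide_eq_true_eq]
          rintro ⟨⟨ha, hb⟩, -⟩; exact absurd ⟨ha, hb⟩ h1
        have e2 : bmgHitL (c :: cs) p = bmgHitL cs p := by
          simp only [bmgHitL, List.any_cons, Bool.or_eq_right_iff_imp, Bool.and_eq_true,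
            beq_iff_eq, decide_eq_true_eq]
          rintro ⟨⟨ha, hb⟩, -⟩; exact absurd ⟨ha, hb⟩ h1
        have e3 : bmgHitD (c :: cs) p = bmgHitD cs p := by
          simp only [bmgHitD, List.any_cons, Bool.or_eq_right_iff_imp, Bool.and_eq_true,
            beq_iff_eq, decide_eq_true_eq]
          rintro ⟨⟨ha, hb⟩, -⟩; exact absurd ⟨ha, hb⟩ h2
        have e4 : bmgHitU (c :: cs) p = bmgHitU cs p := by
          simp only [bmgHitU, List.any_cons, Bool.or_eq_right_iff_imp, Bool.and_eq_true,
            beq_iff_eq, decide_eq_true_eq]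
          rintro ⟨⟨ha, hb⟩, -⟩; exact absurd ⟨ha, hb⟩ h2
        rw [e1, e2, e3, e4]

lemma bmg_mask_getD (w : List (Int × Int)) (p : Int × Int) :
    (bmgMasks w).getD p 0 = bmgMaskVal (bmgHitR w p) (bmgHitL w p) (bmgHitD w p) (bmgHitU w p) := by
  rw [bmgMasks_eq_foldl,
    bmg_mask_inv w PySem.Dict.empty (fun _ => false) (fun _ => false) (fun _ => false) (fun _ => false)
      (fun q => rfl) p]
  simp

-- at a grid node, the hit booleans are exactly A's four walkable probes
lemma bmg_hit_contains (w : List (Int × Int)) (nx ny : Int)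
    (hx : (6 : Int) ∣ nx) (hy : (6 : Int) ∣ ny) :
    bmgHitR w (nx, ny) = w.contains (nx + 3, ny) ∧
    bmgHitL w (nx, ny) = w.contains (nx + -3, ny) ∧
    bmgHitD w (nx, ny) = w.contains (nx, ny + 3) ∧
    bmgHitU w (nx, ny) = w.contains (nx, ny + -3) := by
  have hmod : ∀ z : Int, PySem.Int.mod z 6 = z % 6 := fun z =>
    PySem.Int.mod_eq_emod_of_pos (by norm_num)
  refine ⟨?_, ?_, ?_, ?_⟩ <;>
    simp only [bmgHitR, bmgHitL, bmgHitD, bmgHitU] <;>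
    rw [Bool.eq_iff_iff, List.any_eq_true, List.contains_iff_mem] <;>
    constructor
  · rintro ⟨⟨c1, c2⟩, hc, hcond⟩
    simp only [Bool.and_eq_true, beq_iff_eq, decide_eq_true_eq, Prod.mk.injEq] at hcond
    obtain ⟨⟨h3, h0⟩, he1, he2⟩ := hcond
    have : ((nx + 3 : Int), ny) = (c1, c2) := by rw [Prod.mk.injEq]; exact ⟨by omega, by omega⟩
    rwa [this]
  · intro h
    refine ⟨(nx + 3, ny), h, ?_⟩
    simp only [Bool.and_eq_true, beq_iff_eq, decide_eq_true_eq, Prod.mk.injEq, hmod]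
    refine ⟨⟨by omega, by omega⟩, ?_, ?_⟩ <;> first | trivial | omega
  · rintro ⟨⟨c1, c2⟩, hc, hcond⟩
    simp only [Bool.and_eq_true, beq_iff_eq, decide_eq_true_eq, Prod.mk.injEq] at hcond
    obtain ⟨⟨h3, h0⟩, he1, he2⟩ := hcond
    have : ((nx + -3 : Int), ny) = (c1, c2) := by rw [Prod.mk.injEq]; exact ⟨by omega, by omega⟩
    rwa [this]
  · intro h
    refine ⟨(nx + -3, ny), h, ?_⟩
    simp only [Bool.and_eq_true, beq_iff_eq, decide_eq_true_eq, Prod.mk.injEq, hmod]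
    refine ⟨⟨by omega, by omega⟩, ?_, ?_⟩ <;> first | trivial | omega
  · rintro ⟨⟨c1, c2⟩, hc, hcond⟩
    simp only [Bool.and_eq_true, beq_iff_eq, decide_eq_true_eq, Prod.mk.injEq] at hcond
    obtain ⟨⟨h3, h0⟩, he1, he2⟩ := hcond
    have : ((nx : Int), ny + 3) = (c1, c2) := by rw [Prod.mk.injEq]; exact ⟨by omega, by omega⟩
    rwa [this]
  · intro h
    refine ⟨(nx, ny + 3), h, ?_⟩
    simp only [Bool.and_eq_true, beq_iff_eq, decide_eq_true_eq, Prod.mk.injEq, hmod]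
    refine ⟨⟨by omega, by omega⟩, ?_, ?_⟩ <;> first | trivial | omega
  · rintro ⟨⟨c1, c2⟩, hc, hcond⟩
    simp only [Bool.and_eq_true, beq_iff_eq, decide_eq_true_eq, Prod.mk.injEq] at hcond
    obtain ⟨⟨h3, h0⟩, he1, he2⟩ := hcond
    have : ((nx : Int), ny + -3) = (c1, c2) := by rw [Prod.mk.injEq]; exact ⟨by omega, by omega⟩
    rwa [this]
  · intro h
    refine ⟨(nx, ny + -3), h, ?_⟩
    simp only [Bool.and_eq_true, beq_iff_eq, decide_eq_true_eq, Prod.mk.injEq, hmod]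
    refine ⟨⟨by omega, by omega⟩, ?_, ?_⟩ <;> first | trivial | omega

-- the 16-entry table decoded at a maskVal
lemma bmg_table_decode (r l d u : Bool) :
    PySem.List.pyGetD bmgTable (bmgMaskVal r l d u) [] =
      (if r then [((6 : Int), (0 : Int))] else []) ++
      ((if l then [((-6 : Int), (0 : Int))] else []) ++
       ((if d then [((0 : Int), (6 : Int))] else []) ++
        (if u then [((0 : Int), (-6 : Int))] else []))) := by
  cases r <;> cases l <;> cases d <;> cases u <;> decide

-- at a grid node both neighbour computations agree
lemma bmg_neigh_eq (w : List (Int × Int)) (mx my nx ny : Int)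
    (hx : (6 : Int) ∣ nx) (hy : (6 : Int) ∣ ny) :
    bmgNeighA w mx my nx ny = bmgNeighB w mx my nx ny := by
  obtain ⟨hr, hl, hd, hu⟩ := bmg_hit_contains w nx ny hx hy
  have f6 : PySem.Int.floordiv (6 : Int) 2 = 3 := by decide
  have fm6 : PySem.Int.floordiv (-6 : Int) 2 = -3 := by decide
  have f0 : PySem.Int.floordiv (0 : Int) 2 = 0 := by decide
  unfold bmgNeighA bmgNeighB
  rw [bmg_mask_getD, hr, hl, hd, hu, bmg_table_decode]
  by_cases hcr : (nx + 3, ny) ∈ w <;> by_cases hcl : (nx + -3, ny) ∈ w <;>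
    by_cases hcd : (nx, ny + 3) ∈ w <;> by_cases hcu : (nx, ny + -3) ∈ w <;>
    simp [List.foldl_cons, List.foldl_nil, List.foldl_append, f6, fm6, f0, add_zero,
      hcr, hcl, hcd, hcu]

lemma bmg_nodup_pyRange6 (a b : Int) : (PySem.List.pyRange a b 6).Nodup := by
  rw [PySem.List.pyRange_of_pos a b (by norm_num)]
  have hinj : Function.Injective (fun k : Nat => a + 6 * (k : Int)) := by
    intro k l h
    simp only at h
    omega
  exact List.nodup_range.map hinj

lemma bmg_nodup_nodeList (arr_h arr_w : Int) : (bmgNodeList arr_h arr_w).Nodup := by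
  unfold bmgNodeList
  rw [List.flatMap_def, List.nodup_flatten]
  constructor
  · intro l hl
    simp only [List.mem_map] at hl
    obtain ⟨wy, _, rfl⟩ := hl
    have hinj : Function.Injective (fun wx : Int => (wx, wy)) := by
      intro a b h
      simpa using congrArg Prod.fst h
    exact (bmg_nodup_pyRange6 _ _).map hinj
  · rw [List.pairwise_map]
    refine (bmg_nodup_pyRange6 _ _).imp ?_
    intro y1 y2 hne p hp1 hp2
    simp only [List.mem_map] at hp1 hp2
    obtain ⟨x1, _, rfl⟩ := hp1
    obtain ⟨x2, _, h2⟩ := hp2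
    exact hne (show y1 = y2 from (congrArg Prod.snd h2).symm)

-- A's node set, iterated, is the row-major node list.
lemma bmg_nodes_eq (arr_h arr_w : Int) :
    (PySem.List.pyRange 0 (arr_h + 1) 6).foldl (fun ns wy =>
        (PySem.List.pyRange 0 (arr_w + 1) 6).foldl (fun ns wx => ns.add (wx, wy)) ns)
      PySem.Set.empty = bmgNodeList arr_h arr_w := by
  have h1 : (bmgNodeList arr_h arr_w).foldl PySem.Set.add PySem.Set.empty =
      (PySem.List.pyRange 0 (arr_h + 1) 6).foldl (fun ns wy =>
        (PySem.List.pyRange 0 (arr_w + 1) 6).foldl (fun ns wx => ns.add (wx, wy)) ns)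
      PySem.Set.empty := by
    unfold bmgNodeList
    rw [List.flatMap_def, List.foldl_flatten, List.foldl_map]
    simp only [List.foldl_map]
  rw [← h1, show (PySem.Set.empty : PySem.Set (Int × Int)) = ([] : List (Int × Int)) from rfl,
    ← PySem.Set.ofList_eq_foldl]
  exact PySem.Set.ofList_eq_self_of_nodup _ (bmg_nodup_nodeList arr_h arr_w)

-- Core equality, for any bounding box.
lemma bmg_core (w : List (Int × Int)) (mx my arr_h arr_w : Int) :
    ((((PySem.List.pyRange 0 (arr_h + 1) 6).foldl (fun ns wy =>
          (PySem.List.pyRange 0 (arr_w + 1) 6).foldl (fun ns wx => ns.add (wx, wy)) ns)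
        PySem.Set.empty).foldl
        (fun g nd => g.insert (nd.1 + mx, nd.2 + my) (bmgNeighA w mx my nd.1 nd.2))
        PySem.Dict.empty).items.map (fun kv => (kv.1.1, kv.1.2, kv.2)) :
      List (Int × Int × List (Int × Int))) =
    ((((PySem.List.pyRange 0 (arr_h + 1) 6).foldl (fun ns wy =>
          (PySem.List.pyRange 0 (arr_w + 1) 6).foldl (fun ns wx => ns.add (wx, wy)) ns)
        PySem.Set.empty).foldl
        (fun g nd => g.insert (nd.1 + mx, nd.2 + my) (bmgNeighB w mx my nd.1 nd.2))
        PySem.Dict.empty).items.map (fun kv => (kv.1.1, kv.1.2, kv.2))) := by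
  rw [bmg_nodes_eq]
  have hkeyinj : Function.Injective (fun nd : Int × Int => (nd.1 + mx, nd.2 + my)) := by
    intro a b h
    simp only [Prod.mk.injEq] at h
    exact Prod.ext (by omega) (by omega)
  have hkey : ((bmgNodeList arr_h arr_w).map (fun nd : Int × Int => (nd.1 + mx, nd.2 + my))).Nodup :=
    (bmg_nodup_nodeList arr_h arr_w).map hkeyinj
  rw [PySem.Dict.items_foldl_insert_fresh _ _ _ _
      (fun a _ => PySem.Dict.contains_empty _) hkey,
    PySem.Dict.items_foldl_insert_fresh _ _ _ _
      (fun a _ => PySem.Dict.contains_empty _) hkey]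
  simp only [show (PySem.Dict.empty : PySem.Dict (Int × Int) (List (Int × Int))).items = [] from rfl,
    List.nil_append, List.map_map]
  apply List.map_congr_left
  intro nd hnd
  have hdvd : (6 : Int) ∣ nd.1 ∧ (6 : Int) ∣ nd.2 := by
    unfold bmgNodeList at hnd
    simp only [List.mem_flatMap, List.mem_map] at hnd
    obtain ⟨wy, hwy, wx, hwx, rfl⟩ := hnd
    rw [PySem.List.mem_pyRange_iff_of_pos (by norm_num)] at hwy
    rw [PySem.List.mem_pyRange_iff_of_pos (by norm_num)] at hwx
    exact ⟨by simpa using hwx.2.2, by simpa using hwy.2.2⟩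
  dsimp only [Function.comp]
  rw [bmg_neigh_eq w mx my nd.1 nd.2 hdvd.1 hdvd.2]

-- ===== VERDICT (by name: the statement is the Claim_ definition above) =====
theorem build_maze_graph_spec : Claim_equal_build_maze_graph := by
  intro w mx my gw gh _
  show build_maze_graph w mx my gw gh = build_maze_graph_alt w mx my gw gh
  exact bmg_core w mx my _ _
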